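-- pv_equiv track=rewrite | github.com/abiisnn/Natural-Language-Processing | Practice/27/Abigail_Nicolas_Sayago_27.py | getWordsProbability
-- ===== SOURCE A (Python) =====
-- def getWordsProbability(word_list, dictionary, frecuency):
-- 	frec_pos = {}
-- 	frec_neg = {}
-- 	for key, value in word_list.items():
-- 		frec_pos[key] = list()
-- 		frec_neg[key] = list()
--
-- 	for key, value in word_list.items():
-- 		for word in value:
-- 			if word in dictionary:
-- 				if dictionary[word]:
-- 					frec_pos[key].append((word, frecuency[word]))
-- 				else:
-- 					frec_neg[key].append((word, frecuency[word]))
-- 	for key, value in frec_pos.items():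
-- 		l = sorted(value, key=lambda tup: tup[1])
-- 		frec_pos[key] = l
-- 	for key, value in frec_neg.items():
-- 		l = sorted(value, key=lambda tup: tup[1])
-- 		frec_neg[key] = l
--
-- 	return frec_pos, frec_neg
-- ===== SOURCE B (Python) =====
-- def getWordsProbability(word_list, dictionary, frecuency):
--     frec_pos = {}
--     frec_neg = {}
--     for key, words in word_list.items():
--         matched = sorted(((w, frecuency[w]) for w in words if w in dictionary),
--                          key=lambda t: t[1])
--         pos = []
--         neg = []
--         for t in matched:
--             if dictionary[t[0]]:
--                 pos.append(t)
--             else: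
--                 neg.append(t)
--         frec_pos[key] = pos
--         frec_neg[key] = neg
--     return frec_pos, frec_neg
-- ===== Notes on version B (the rewrite author's own statement) =====
-- stated objective: alternative
-- what changed: Instead of A's four passes (init empty buckets, append into per-key pos/neg lists, then re-sort every pos value and every neg value in two further dict passes), B makes a single pass over word_list: per key it builds the matched (word,freq) list, sorts that one list once, and partitions the sorted list into pos/neg in order; correctness rests on stable-sort/filter commutation.
import Mathlib
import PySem

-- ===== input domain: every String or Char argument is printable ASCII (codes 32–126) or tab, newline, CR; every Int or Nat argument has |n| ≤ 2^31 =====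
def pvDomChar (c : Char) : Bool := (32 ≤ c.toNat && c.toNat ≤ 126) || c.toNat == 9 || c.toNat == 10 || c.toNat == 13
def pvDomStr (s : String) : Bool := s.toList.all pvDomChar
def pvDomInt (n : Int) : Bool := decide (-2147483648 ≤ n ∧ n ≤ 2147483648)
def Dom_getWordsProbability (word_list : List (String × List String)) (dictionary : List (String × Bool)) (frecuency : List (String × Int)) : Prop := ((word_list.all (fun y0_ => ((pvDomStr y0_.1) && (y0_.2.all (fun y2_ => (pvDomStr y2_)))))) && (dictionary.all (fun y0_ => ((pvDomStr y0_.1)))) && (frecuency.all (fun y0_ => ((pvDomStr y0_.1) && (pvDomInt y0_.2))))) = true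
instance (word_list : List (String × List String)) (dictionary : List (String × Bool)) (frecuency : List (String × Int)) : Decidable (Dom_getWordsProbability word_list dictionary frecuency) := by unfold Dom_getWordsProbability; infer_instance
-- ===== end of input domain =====

-- B replaces A's four dict passes (init, append into pos/neg buckets, sort all pos values, sort all neg values)
-- by a single pass over word_list that sorts each key's matched list once and partitions it in order; same results.


-- ===== PORT A =====
-- dict arguments are modelled as PySem.Dict built from the association list (Python dict semantics:
-- first-occurrence position, last value wins).  frecuency[word] is ported as fd.getD w 0, exact under
-- Pre_ (which excludes the KeyError inputs).
def getWordsProbability (word_list : List (String × List String)) (dictionary : List (String × Bool)) (frecuency : List (String × Int)) : (List (String × List (String × Int))) × (List (String × List (String × Int))) :=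
  let wl := PySem.Dict.ofList word_list
  let dd := PySem.Dict.ofList dictionary
  let fd := PySem.Dict.ofList frecuency
  let frec_pos : PySem.Dict String (List (String × Int)) :=
    wl.items.foldl (fun d p => d.insert p.1 []) PySem.Dict.empty
  let frec_neg : PySem.Dict String (List (String × Int)) :=
    wl.items.foldl (fun d p => d.insert p.1 []) PySem.Dict.empty
  let st :=
    wl.items.foldl (fun (st : PySem.Dict String (List (String × Int)) × PySem.Dict String (List (String × Int))) p =>
      p.2.foldl (fun st w =>
        if dd.contains w then
          if dd.getD w false then
            (st.1.modify p.1 [] (· ++ [(w, fd.getD w 0)]), st.2)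
          else
            (st.1, st.2.modify p.1 [] (· ++ [(w, fd.getD w 0)]))
        else st) st) (frec_pos, frec_neg)
  let frec_pos := st.1.items.foldl (fun d p => d.insert p.1 (PySem.List.sorted p.2 (fun tup => tup.2) false)) st.1
  let frec_neg := st.2.items.foldl (fun d p => d.insert p.1 (PySem.List.sorted p.2 (fun tup => tup.2) false)) st.2
  (frec_pos.items, frec_neg.items)

-- ===== PORT B =====
def getWordsProbability_alt (word_list : List (String × List String)) (dictionary : List (String × Bool)) (frecuency : List (String × Int)) : (List (String × List (String × Int))) × (List (String × List (String × Int))) :=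
  let wl := PySem.Dict.ofList word_list
  let dd := PySem.Dict.ofList dictionary
  let fd := PySem.Dict.ofList frecuency
  let st :=
    wl.items.foldl (fun (st : PySem.Dict String (List (String × Int)) × PySem.Dict String (List (String × Int))) p =>
      let matched := PySem.List.sorted ((p.2.filter (fun w => dd.contains w)).map (fun w => (w, fd.getD w 0))) (fun t => t.2) false
      let pn := matched.foldl (fun (pn : List (String × Int) × List (String × Int)) t =>
          if dd.getD t.1 false then (pn.1 ++ [t], pn.2) else (pn.1, pn.2 ++ [t])) ([], [])
      (st.1.insert p.1 pn.1, st.2.insert p.1 pn.2)) (PySem.Dict.empty, PySem.Dict.empty)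
  (st.1.items, st.2.items)

-- ===== PRECONDITION & SPEC =====
-- Pre_ excludes exactly the KeyError inputs: a word that is a key of dictionary but not of frecuency
-- makes A (and B) raise on frecuency[word].
def Pre_getWordsProbability (word_list : List (String × List String)) (dictionary : List (String × Bool)) (frecuency : List (String × Int)) : Prop :=
  ∀ p ∈ word_list, ∀ w ∈ p.2, w ∈ dictionary.map (·.1) → w ∈ frecuency.map (·.1)
instance (word_list : List (String × List String)) (dictionary : List (String × Bool)) (frecuency : List (String × Int)) : Decidable (Pre_getWordsProbability word_list dictionary frecuency) := by unfold Pre_getWordsProbability; infer_instance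
def pvWitness_getWordsProbability : (List (String × List String)) × (List (String × Bool)) × (List (String × Int)) :=
  ([("k", ["a", "b", "c", "a"]), ("m", [])], [("a", true), ("b", false)], [("a", 2), ("b", 1), ("c", 5)])

def Spec_getWordsProbability (word_list : List (String × List String)) (dictionary : List (String × Bool)) (frecuency : List (String × Int)) (out : (List (String × List (String × Int))) × (List (String × List (String × Int)))) : Prop := out = getWordsProbability_alt word_list dictionary frecuency
instance (word_list : List (String × List String)) (dictionary : List (String × Bool)) (frecuency : List (String × Int)) (out : (List (String × List (String × Int))) × (List (String × List (String × Int)))) : Decidable (Spec_getWordsProbability word_list dictionary frecuency out) := by unfold Spec_getWordsProbability; infer_instance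

-- ===== CLAIM (what is proved, stated in full; the proofs are below) =====
def Claim_equal_getWordsProbability : Prop := ∀ (word_list : List (String × List String)) (dictionary : List (String × Bool)) (frecuency : List (String × Int)), Dom_getWordsProbability word_list dictionary frecuency → Pre_getWordsProbability word_list dictionary frecuency → Spec_getWordsProbability word_list dictionary frecuency (getWordsProbability word_list dictionary frecuency)

-- ===== LEMMAS AND PROOFS =====

theorem pv_pair_foldl_split {α β γ : Type} (l : List γ) (f : α → γ → α) (g : β → γ → β) (a : α) (b : β) :
    l.foldl (fun st x => (f st.1 x, g st.2 x)) (a, b) = (l.foldl f a, l.foldl g b) := by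
  induction l generalizing a b with
  | nil => rfl
  | cons x t ih => simpa using ih (f a x) (g b x)

theorem pv_insertBy_cons {α : Type} (bef : α → α → Bool) (x y : α) (t : List α) :
    PySem.List.insertBy bef x (y :: t) =
      if bef x y then x :: y :: t else y :: PySem.List.insertBy bef x t := rfl

theorem pv_insertBy_head {α : Type} (key : α → Int) (x : α) (l : List α)
    (h : ∀ z ∈ l, key x < key z) :
    PySem.List.insertBy (fun a b => decide (key a < key b)) x l = x :: l := by
  cases l with
  | nil => rfl
  | cons z zs =>
    rw [pv_insertBy_cons]
    simp [h z (List.mem_cons_self)]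

theorem pv_filter_insertBy {α : Type} (q : α → Bool) (key : α → Int) (x : α) (ys : List α)
    (h : ys.Pairwise (fun a b => key a ≤ key b)) :
    (PySem.List.insertBy (fun a b => decide (key a < key b)) x ys).filter q =
      if q x then PySem.List.insertBy (fun a b => decide (key a < key b)) x (ys.filter q)
      else ys.filter q := by
  induction ys with
  | nil =>
    cases hq : q x <;> simp [PySem.List.insertBy, List.filter_cons, hq]
  | cons y t ih =>
    rcases List.pairwise_cons.mp h with ⟨hy, ht⟩
    rw [pv_insertBy_cons]
    by_cases hlt : key x < key y
    · simp only [hlt, decide_true, if_true]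
      rw [pv_insertBy_head key x ((y :: t).filter q)
        (by
          intro z hz
          have hz' := List.mem_of_mem_filter hz
          rcases List.mem_cons.mp hz' with rfl | hzt
          · exact hlt
          · exact lt_of_lt_of_le hlt (hy z hzt))]
      cases hq : q x <;> simp [List.filter_cons, hq]
    · simp only [hlt, decide_false, Bool.false_eq_true, if_false]
      rw [List.filter_cons, List.filter_cons, ih ht]
      cases hqy : q y
      · simp
      · simp only [if_true]
        cases hq : q x
        · simp
        · simp only [if_true]
          rw [pv_insertBy_cons]
          simp [hlt]

theorem pv_filter_sorted {α : Type} (q : α → Bool) (key : α → Int) (xs : List α) :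
    (PySem.List.sorted xs key false).filter q = PySem.List.sorted (xs.filter q) key false := by
  induction xs using List.reverseRecOn with
  | nil => rfl
  | append_singleton xs x ih =>
    have h1 : ∀ (l : List α), PySem.List.sorted (l ++ [x]) key false
        = PySem.List.insertBy (fun a b => decide (key a < key b)) x (PySem.List.sorted l key false) := by
      intro l
      rw [PySem.List.sorted_eq_foldl_insertBy, PySem.List.sorted_eq_foldl_insertBy,
        List.foldl_append, List.foldl_cons, List.foldl_nil]
    rw [h1, pv_filter_insertBy q key x _ (PySem.List.sorted_pairwise xs key), ih, List.filter_append]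
    cases hq : q x
    · simp [List.filter_cons, hq]
    · simp only [List.filter_cons, hq, if_true, List.filter_nil]
      rw [h1]

theorem pv_filter_eq_singleton {β : Type} (l : List (String × β)) (p : String × β)
    (hn : (l.map (·.1)).Nodup) (hp : p ∈ l) :
    l.filter (fun q => q.1 == p.1) = [p] := by
  induction l with
  | nil => cases hp
  | cons a l ih =>
    rw [List.map_cons, List.nodup_cons] at hn
    rcases List.mem_cons.mp hp with rfl | hpl
    · rw [List.filter_cons]
      simp only [beq_self_eq_true, if_true]
      have : l.filter (fun q => q.1 == p.1) = [] := by
        apply List.filter_eq_nil_iff.mpr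
        intro b hb
        simp only [beq_iff_eq]
        intro hb1
        exact hn.1 (hb1 ▸ List.mem_map_of_mem hb)
      rw [this]
    · rw [List.filter_cons]
      have hne : (a.1 == p.1) = false := by
        simp only [beq_eq_false_iff_ne, ne_eq]
        intro he
        exact hn.1 (he ▸ List.mem_map_of_mem hpl)
      simp only [hne, Bool.false_eq_true, if_false]
      exact ih hn.2 hpl

theorem pv_find?_map_key {β γ : Type} (l : List (String × β)) (h : String × β → γ) (p : String × β)
    (hn : (l.map (·.1)).Nodup) (hp : p ∈ l) :
    (l.map (fun q => (q.1, h q))).find? (fun q => q.1 == p.1) = some (p.1, h p) := by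
  induction l with
  | nil => cases hp
  | cons a l ih =>
    rw [List.map_cons, List.nodup_cons] at hn
    rcases List.mem_cons.mp hp with rfl | hpl
    · simp [List.find?_cons]
    · rw [List.map_cons, List.find?_cons]
      have hne : (a.1 == p.1) = false := by
        simp only [beq_eq_false_iff_ne, ne_eq]
        intro he
        exact hn.1 (he ▸ List.mem_map_of_mem hpl)
      simp only [hne]
      exact ih hn.2 hpl

theorem pv_items_eq_keys_map {α : Type} (d : PySem.Dict String (List α)) (h : d.keys.Nodup) :
    d.items = d.keys.map (fun k => (k, d.getD k [])) := by
  simp only [PySem.Dict.keys, List.map_map]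
  have hcg : ∀ p ∈ d.items, ((fun k => (k, d.getD k [])) ∘ (fun x => x.1)) p = id p := by
    rintro ⟨k, v⟩ hm
    simp only [Function.comp, id]
    rw [PySem.Dict.getD_of_mem_items d hm h]
  rw [List.map_congr_left hcg, List.map_id]

theorem pv_foldl_guard_modify {α : Type} (F : String → Bool) (val : String → α) (key : String)
    (v : List String) (d : PySem.Dict String (List α)) (hc : d.contains key = true) :
    ((v.foldl (fun d w => if F w then d.modify key [] (· ++ [val w]) else d) d).keys = d.keys) ∧
    (∀ c, (v.foldl (fun d w => if F w then d.modify key [] (· ++ [val w]) else d) d).getD c [] =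
      d.getD c [] ++ (if c = key then (v.filter F).map val else [])) := by
  induction v generalizing d with
  | nil =>
    refine ⟨rfl, ?_⟩
    intro c
    split <;> simp
  | cons w v ih =>
    simp only [List.foldl_cons]
    cases hF : F w
    · simp only [Bool.false_eq_true, if_false]
      obtain ⟨ihk, ihg⟩ := ih d hc
      refine ⟨ihk, ?_⟩
      intro c
      rw [ihg c]
      simp only [List.filter_cons, hF, Bool.false_eq_true, if_false]
    · simp only [if_true]
      have hc' : (d.modify key [] (· ++ [val w])).contains key = true := by
        simp only [PySem.Dict.modify]
        exact PySem.Dict.contains_insert_self d key _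
      obtain ⟨ihk, ihg⟩ := ih (d.modify key [] (· ++ [val w])) hc'
      have hk : (d.modify key [] (· ++ [val w])).keys = d.keys := by
        simp only [PySem.Dict.modify]
        exact PySem.Dict.keys_insert_of_contains d _ hc
      refine ⟨ihk.trans hk, ?_⟩
      intro c
      rw [ihg c]
      have hgd : (d.modify key [] (· ++ [val w])).getD c [] =
          if c = key then d.getD key [] ++ [val w] else d.getD c [] := by
        simp only [PySem.Dict.modify]
        rw [PySem.Dict.getD_insert]
      rw [hgd]
      by_cases hck : c = key
      · subst hck
        simp only [if_pos rfl, List.filter_cons, hF, if_true, List.map_cons, List.append_assoc,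
          List.cons_append, List.nil_append]
      · simp [hck]

theorem pv_foldl_outer_modify {α : Type} (F : String → Bool) (val : String → α)
    (l : List (String × List String)) (d : PySem.Dict String (List α))
    (hc : ∀ p ∈ l, d.contains p.1 = true) :
    ((l.foldl (fun d p => p.2.foldl (fun d w => if F w then d.modify p.1 [] (· ++ [val w]) else d) d) d).keys = d.keys) ∧
    (∀ c, (l.foldl (fun d p => p.2.foldl (fun d w => if F w then d.modify p.1 [] (· ++ [val w]) else d) d) d).getD c [] =
      d.getD c [] ++ (l.filter (fun p => p.1 == c)).flatMap (fun p => (p.2.filter F).map val)) := by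
  induction l generalizing d with
  | nil =>
    refine ⟨rfl, ?_⟩
    intro c
    simp
  | cons p l ih =>
    obtain ⟨hk1, hg1⟩ := pv_foldl_guard_modify F val p.1 p.2 d (hc p List.mem_cons_self)
    simp only [List.foldl_cons]
    have hc' : ∀ r ∈ l,
        (p.2.foldl (fun d w => if F w then d.modify p.1 [] (· ++ [val w]) else d) d).contains r.1 = true := by
      intro r hr
      rw [PySem.Dict.contains_eq_decide_mem_keys, hk1, ← PySem.Dict.contains_eq_decide_mem_keys]
      exact hc r (List.mem_cons_of_mem _ hr)
    obtain ⟨ihk, ihg⟩ := ih _ hc'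
    refine ⟨ihk.trans hk1, ?_⟩
    intro c
    rw [ihg c, hg1 c, List.filter_cons]
    by_cases hpc : c = p.1
    · have hb : (p.1 == c) = true := beq_iff_eq.mpr hpc.symm
      simp [hpc, List.flatMap_cons, List.append_assoc]
    · have hb : (p.1 == c) = false := by
        simp only [beq_eq_false_iff_ne, ne_eq]
        exact fun h => hpc h.symm
      simp only [hpc, if_neg hpc, hb, Bool.false_eq_true, if_false, List.append_nil]

theorem pv_foldl_insert_sortmap {α : Type} (s : List α → List α) (m : List (String × List α))
    (d : PySem.Dict String (List α)) (hn : (m.map (·.1)).Nodup)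
    (hc : ∀ p ∈ m, d.contains p.1 = true) :
    ((m.foldl (fun d p => d.insert p.1 (s p.2)) d).keys = d.keys) ∧
    (∀ c, (m.foldl (fun d p => d.insert p.1 (s p.2)) d).getD c [] =
      match m.find? (fun p => p.1 == c) with
      | some p => s p.2
      | none => d.getD c []) := by
  induction m generalizing d with
  | nil =>
    refine ⟨rfl, ?_⟩
    intro c
    simp
  | cons p m ih =>
    rw [List.map_cons, List.nodup_cons] at hn
    simp only [List.foldl_cons]
    have hck : (d.insert p.1 (s p.2)).keys = d.keys :=
      PySem.Dict.keys_insert_of_contains d _ (hc p List.mem_cons_self)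
    have hc' : ∀ r ∈ m, (d.insert p.1 (s p.2)).contains r.1 = true := by
      intro r hr
      rw [PySem.Dict.contains_eq_decide_mem_keys, hck, ← PySem.Dict.contains_eq_decide_mem_keys]
      exact hc r (List.mem_cons_of_mem _ hr)
    obtain ⟨ihk, ihg⟩ := ih _ hn.2 hc'
    refine ⟨ihk.trans hck, ?_⟩
    intro c
    rw [ihg c, List.find?_cons]
    by_cases hpc : p.1 = c
    · have hb : (p.1 == c) = true := beq_iff_eq.mpr hpc
      rw [hb]
      have hnone : m.find? (fun r => r.1 == c) = none := by
        apply List.find?_eq_none.mpr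
        intro r hr
        simp only [beq_iff_eq]
        intro hrc
        exact hn.1 (by rw [← hpc] at hrc; exact hrc ▸ List.mem_map_of_mem hr)
      rw [hnone]
      simp only []
      rw [PySem.Dict.getD_insert]
      simp [hpc]
    · have hb : (p.1 == c) = false := by
        simp only [beq_eq_false_iff_ne, ne_eq]
        exact hpc
      rw [hb]
      cases hfind : m.find? (fun r => r.1 == c)
      · have hne : (d.insert p.1 (s p.2)).getD c [] = d.getD c [] := by
          rw [PySem.Dict.getD_insert, if_neg (fun h => hpc h.symm)]
        simp [hne]
      · simp only []

theorem pv_side_eq (dd : PySem.Dict String Bool) (fd : PySem.Dict String Int)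
    (l : List (String × List String)) (hn : (l.map (·.1)).Nodup)
    (F : String → Bool) (G : String × Int → Bool)
    (hFG : ∀ w, F w = (dd.contains w && G (w, fd.getD w 0))) :
    ((l.foldl (fun d p => p.2.foldl (fun d w => if F w then d.modify p.1 [] (· ++ [(w, fd.getD w 0)]) else d) d)
        (l.foldl (fun d p => d.insert p.1 ([] : List (String × Int))) PySem.Dict.empty)).items.foldl
      (fun d p => d.insert p.1 (PySem.List.sorted p.2 (fun tup => tup.2) false))
      (l.foldl (fun d p => p.2.foldl (fun d w => if F w then d.modify p.1 [] (· ++ [(w, fd.getD w 0)]) else d) d)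
        (l.foldl (fun d p => d.insert p.1 ([] : List (String × Int))) PySem.Dict.empty))).items =
    l.map (fun p => (p.1,
      (PySem.List.sorted ((p.2.filter (fun w => dd.contains w)).map (fun w => (w, fd.getD w 0))) (fun t => t.2) false).filter G)) := by
  have hitems0 : (l.foldl (fun d p => d.insert p.1 ([] : List (String × Int))) PySem.Dict.empty).items
      = l.map (fun p => (p.1, ([] : List (String × Int)))) := by
    have h := PySem.Dict.items_foldl_insert_fresh l (fun p => p.1) (fun _ => ([] : List (String × Int)))
      PySem.Dict.empty (fun a _ => PySem.Dict.contains_empty a.1) hn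
    simpa using h
  set d0 := l.foldl (fun d p => d.insert p.1 ([] : List (String × Int))) PySem.Dict.empty with hd0
  have hkeys0 : d0.keys = l.map (·.1) := by
    simp [PySem.Dict.keys, hitems0]
  have hn0 : d0.keys.Nodup := by rw [hkeys0]; exact hn
  have hc0 : ∀ p ∈ l, d0.contains p.1 = true := by
    intro p hp
    rw [PySem.Dict.contains_eq_decide_mem_keys, hkeys0]
    simp only [decide_eq_true_eq]
    exact List.mem_map_of_mem hp
  have hg0 : ∀ p ∈ l, d0.getD p.1 [] = [] := by
    intro p hp
    exact PySem.Dict.getD_of_mem_items d0 (by rw [hitems0]; exact List.mem_map_of_mem hp) hn0 []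
  obtain ⟨hk2, hg2⟩ := pv_foldl_outer_modify F (fun w => ((w, fd.getD w 0) : String × Int)) l d0 hc0
  set d2 := l.foldl (fun d p => p.2.foldl (fun d w => if F w then d.modify p.1 [] (· ++ [(w, fd.getD w 0)]) else d) d) d0 with hd2
  have hkeys2 : d2.keys = l.map (·.1) := hk2.trans hkeys0
  have hn2 : d2.keys.Nodup := by rw [hkeys2]; exact hn
  have hval2 : ∀ p ∈ l, d2.getD p.1 [] = (p.2.filter F).map (fun w => ((w, fd.getD w 0) : String × Int)) := by
    intro p hp
    rw [hg2 p.1, hg0 p hp, pv_filter_eq_singleton l p hn hp]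
    simp
  have hitems2 : d2.items = l.map (fun p => (p.1, (p.2.filter F).map (fun w => ((w, fd.getD w 0) : String × Int)))) := by
    rw [pv_items_eq_keys_map d2 hn2, hkeys2, List.map_map]
    apply List.map_congr_left
    intro p hp
    simp only [Function.comp]
    rw [hval2 p hp]
  have hc2 : ∀ p ∈ d2.items, d2.contains p.1 = true := by
    intro p hp
    rw [PySem.Dict.contains_eq_decide_mem_keys]
    simp only [decide_eq_true_eq]
    exact PySem.Dict.mem_keys_of_mem_items d2 hp
  have hnm : (d2.items.map (·.1)).Nodup := hn2
  obtain ⟨hk3, hg3⟩ := pv_foldl_insert_sortmap (fun v => PySem.List.sorted v (fun tup => tup.2) false) d2.items d2 hnm hc2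
  set d3 := d2.items.foldl (fun d p => d.insert p.1 (PySem.List.sorted p.2 (fun tup => tup.2) false)) d2 with hd3
  have hkeys3 : d3.keys = l.map (·.1) := hk3.trans hkeys2
  have hn3 : d3.keys.Nodup := by rw [hkeys3]; exact hn
  rw [pv_items_eq_keys_map d3 hn3, hkeys3, List.map_map]
  apply List.map_congr_left
  intro p hp
  simp only [Function.comp]
  have hval3 : d3.getD p.1 [] =
      (PySem.List.sorted ((p.2.filter (fun w => dd.contains w)).map (fun w => (w, fd.getD w 0))) (fun t => t.2) false).filter G := by
    have hfind : d2.items.find? (fun r => r.1 == p.1) =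
        some (p.1, (p.2.filter F).map (fun w => ((w, fd.getD w 0) : String × Int))) := by
      rw [hitems2]
      exact pv_find?_map_key l (fun p => (p.2.filter F).map (fun w => ((w, fd.getD w 0) : String × Int))) p hn hp
    rw [hg3 p.1, hfind]
    show PySem.List.sorted ((p.2.filter F).map (fun w => ((w, fd.getD w 0) : String × Int))) (fun tup => tup.2) false = _
    rw [pv_filter_sorted G (fun t => t.2) ((p.2.filter (fun w => dd.contains w)).map (fun w => (w, fd.getD w 0)))]
    exact congrArg (fun xs => PySem.List.sorted xs (fun tup : String × Int => tup.2) false)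
      (by
        rw [List.filter_map, List.filter_filter]
        exact congrArg (List.map _) (List.filter_congr (by
          intro w _
          rw [hFG w]
          simp [Function.comp, Bool.and_comm])))
  rw [hval3]

theorem pv_main (word_list : List (String × List String)) (dictionary : List (String × Bool)) (frecuency : List (String × Int)) :
    getWordsProbability word_list dictionary frecuency = getWordsProbability_alt word_list dictionary frecuency := by
  simp only [getWordsProbability, getWordsProbability_alt]
  set dd := PySem.Dict.ofList dictionary with hdd
  set fd := PySem.Dict.ofList frecuency with hfd
  set l := (PySem.Dict.ofList word_list).items with hl
  have hn : (l.map (·.1)).Nodup := PySem.Dict.nodup_keys_ofList word_list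
  set d0 := l.foldl (fun d p => d.insert p.1 ([] : List (String × Int))) PySem.Dict.empty with hd0
  -- split A's collection loop into two independent dictionary folds
  have hA : l.foldl (fun (st : PySem.Dict String (List (String × Int)) × PySem.Dict String (List (String × Int))) p =>
      p.2.foldl (fun st w =>
        if dd.contains w then
          if dd.getD w false then
            (st.1.modify p.1 [] (· ++ [(w, fd.getD w 0)]), st.2)
          else
            (st.1, st.2.modify p.1 [] (· ++ [(w, fd.getD w 0)]))
        else st) st) (d0, d0)
      = (l.foldl (fun d p => p.2.foldl (fun d w => if (dd.contains w && dd.getD w false) then d.modify p.1 [] (· ++ [(w, fd.getD w 0)]) else d) d) d0,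
         l.foldl (fun d p => p.2.foldl (fun d w => if (dd.contains w && !(dd.getD w false)) then d.modify p.1 [] (· ++ [(w, fd.getD w 0)]) else d) d) d0) := by
    rw [PySem.List.foldl_congr_mem l _
      (fun (st : PySem.Dict String (List (String × Int)) × PySem.Dict String (List (String × Int))) p =>
        (p.2.foldl (fun d w => if (dd.contains w && dd.getD w false) then d.modify p.1 [] (· ++ [(w, fd.getD w 0)]) else d) st.1,
         p.2.foldl (fun d w => if (dd.contains w && !(dd.getD w false)) then d.modify p.1 [] (· ++ [(w, fd.getD w 0)]) else d) st.2))
      (d0, d0)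
      (by
        intro st p _
        calc p.2.foldl (fun st w =>
              if dd.contains w then
                if dd.getD w false then
                  (st.1.modify p.1 [] (· ++ [(w, fd.getD w 0)]), st.2)
                else
                  (st.1, st.2.modify p.1 [] (· ++ [(w, fd.getD w 0)]))
              else st) st
            = p.2.foldl (fun st w =>
                ((fun d w => if (dd.contains w && dd.getD w false) then d.modify p.1 [] (· ++ [(w, fd.getD w 0)]) else d) st.1 w,
                 (fun d w => if (dd.contains w && !(dd.getD w false)) then d.modify p.1 [] (· ++ [(w, fd.getD w 0)]) else d) st.2 w)) st := by
              refine PySem.List.foldl_congr_mem p.2 _ _ st ?_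
              intro acc w _
              cases hcw : dd.contains w <;> cases hgw : dd.getD w false <;> simp [hcw, hgw]
          _ = _ := pv_pair_foldl_split p.2
                (fun d w => if (dd.contains w && dd.getD w false) then d.modify p.1 [] (· ++ [(w, fd.getD w 0)]) else d)
                (fun d w => if (dd.contains w && !(dd.getD w false)) then d.modify p.1 [] (· ++ [(w, fd.getD w 0)]) else d)
                st.1 st.2)]
    exact pv_pair_foldl_split l
      (fun d p => p.2.foldl (fun d w => if (dd.contains w && dd.getD w false) then d.modify p.1 [] (· ++ [(w, fd.getD w 0)]) else d) d)
      (fun d p => p.2.foldl (fun d w => if (dd.contains w && !(dd.getD w false)) then d.modify p.1 [] (· ++ [(w, fd.getD w 0)]) else d) d)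
      d0 d0
  -- split B's loop likewise, and its per-key partition into two filters
  have hpn : ∀ (xs : List (String × Int)),
      xs.foldl (fun (pn : List (String × Int) × List (String × Int)) t =>
        if dd.getD t.1 false then (pn.1 ++ [t], pn.2) else (pn.1, pn.2 ++ [t])) ([], [])
      = (xs.filter (fun t => dd.getD t.1 false), xs.filter (fun t => !(dd.getD t.1 false))) := by
    intro xs
    calc xs.foldl (fun (pn : List (String × Int) × List (String × Int)) t =>
          if dd.getD t.1 false then (pn.1 ++ [t], pn.2) else (pn.1, pn.2 ++ [t])) ([], [])
        = xs.foldl (fun (pn : List (String × Int) × List (String × Int)) t =>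
            ((fun a t => if dd.getD t.1 false then a ++ [t] else a) pn.1 t,
             (fun b t => if !(dd.getD t.1 false) then b ++ [t] else b) pn.2 t)) ([], []) := by
          refine PySem.List.foldl_congr_mem xs _ _ ([], []) ?_
          intro acc t _
          cases hg : dd.getD t.1 false <;> simp [hg]
      _ = (xs.foldl (fun a t => if dd.getD t.1 false then a ++ [t] else a) [],
           xs.foldl (fun b t => if !(dd.getD t.1 false) then b ++ [t] else b) []) := pv_pair_foldl_split xs
            (fun a t => if dd.getD t.1 false then a ++ [t] else a)
            (fun b t => if !(dd.getD t.1 false) then b ++ [t] else b) [] []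
      _ = _ := by
          rw [PySem.List.foldl_append_if_eq_filter, PySem.List.foldl_append_if_eq_filter]
          simp
  have hB : l.foldl (fun (st : PySem.Dict String (List (String × Int)) × PySem.Dict String (List (String × Int))) p =>
      (st.1.insert p.1 ((PySem.List.sorted ((p.2.filter (fun w => dd.contains w)).map (fun w => (w, fd.getD w 0))) (fun t => t.2) false).foldl
          (fun (pn : List (String × Int) × List (String × Int)) t =>
            if dd.getD t.1 false then (pn.1 ++ [t], pn.2) else (pn.1, pn.2 ++ [t])) ([], [])).1,
       st.2.insert p.1 ((PySem.List.sorted ((p.2.filter (fun w => dd.contains w)).map (fun w => (w, fd.getD w 0))) (fun t => t.2) false).foldl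
          (fun (pn : List (String × Int) × List (String × Int)) t =>
            if dd.getD t.1 false then (pn.1 ++ [t], pn.2) else (pn.1, pn.2 ++ [t])) ([], [])).2)) (PySem.Dict.empty, PySem.Dict.empty)
      = (l.foldl (fun d p => d.insert p.1 ((PySem.List.sorted ((p.2.filter (fun w => dd.contains w)).map (fun w => (w, fd.getD w 0))) (fun t => t.2) false).filter (fun t => dd.getD t.1 false))) PySem.Dict.empty,
         l.foldl (fun d p => d.insert p.1 ((PySem.List.sorted ((p.2.filter (fun w => dd.contains w)).map (fun w => (w, fd.getD w 0))) (fun t => t.2) false).filter (fun t => !(dd.getD t.1 false)))) PySem.Dict.empty) := by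
    rw [PySem.List.foldl_congr_mem l _
      (fun (st : PySem.Dict String (List (String × Int)) × PySem.Dict String (List (String × Int))) p =>
        ((fun d (p : String × List String) => d.insert p.1 ((PySem.List.sorted ((p.2.filter (fun w => dd.contains w)).map (fun w => (w, fd.getD w 0))) (fun t => t.2) false).filter (fun t => dd.getD t.1 false))) st.1 p,
         (fun d (p : String × List String) => d.insert p.1 ((PySem.List.sorted ((p.2.filter (fun w => dd.contains w)).map (fun w => (w, fd.getD w 0))) (fun t => t.2) false).filter (fun t => !(dd.getD t.1 false)))) st.2 p))
      (PySem.Dict.empty, PySem.Dict.empty)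
      (by
        intro st p _
        rw [hpn]) ]
    exact pv_pair_foldl_split l
      (fun d (p : String × List String) => d.insert p.1 ((PySem.List.sorted ((p.2.filter (fun w => dd.contains w)).map (fun w => (w, fd.getD w 0))) (fun t => t.2) false).filter (fun t => dd.getD t.1 false)))
      (fun d (p : String × List String) => d.insert p.1 ((PySem.List.sorted ((p.2.filter (fun w => dd.contains w)).map (fun w => (w, fd.getD w 0))) (fun t => t.2) false).filter (fun t => !(dd.getD t.1 false))))
      PySem.Dict.empty PySem.Dict.empty
  have hA1 : (l.foldl (fun (st : PySem.Dict String (List (String × Int)) × PySem.Dict String (List (String × Int))) p =>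
      p.2.foldl (fun st w =>
        if dd.contains w then
          if dd.getD w false then
            (st.1.modify p.1 [] (· ++ [(w, fd.getD w 0)]), st.2)
          else
            (st.1, st.2.modify p.1 [] (· ++ [(w, fd.getD w 0)]))
        else st) st) (d0, d0)).1
      = l.foldl (fun d p => p.2.foldl (fun d w => if (dd.contains w && dd.getD w false) then d.modify p.1 [] (· ++ [(w, fd.getD w 0)]) else d) d) d0 := by
    rw [hA]
  have hA2 : (l.foldl (fun (st : PySem.Dict String (List (String × Int)) × PySem.Dict String (List (String × Int))) p =>
      p.2.foldl (fun st w =>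
        if dd.contains w then
          if dd.getD w false then
            (st.1.modify p.1 [] (· ++ [(w, fd.getD w 0)]), st.2)
          else
            (st.1, st.2.modify p.1 [] (· ++ [(w, fd.getD w 0)]))
        else st) st) (d0, d0)).2
      = l.foldl (fun d p => p.2.foldl (fun d w => if (dd.contains w && !(dd.getD w false)) then d.modify p.1 [] (· ++ [(w, fd.getD w 0)]) else d) d) d0 := by
    rw [hA]
  rw [hA1, hA2, hB]
  rw [pv_side_eq dd fd l hn _ (fun t => dd.getD t.1 false) (fun w => rfl),
      pv_side_eq dd fd l hn _ (fun t => !(dd.getD t.1 false)) (fun w => rfl)]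
  rw [PySem.Dict.items_foldl_insert_fresh l (fun p => p.1) _ PySem.Dict.empty (fun a _ => PySem.Dict.contains_empty a.1) hn,
      PySem.Dict.items_foldl_insert_fresh l (fun p => p.1) _ PySem.Dict.empty (fun a _ => PySem.Dict.contains_empty a.1) hn]
  simp [PySem.Dict.empty]

-- ===== VERDICT (by name: the statement is the Claim_ definition above) =====
theorem getWordsProbability_spec : Claim_equal_getWordsProbability := by
  intro word_list dictionary frecuency _ _
  exact pv_main word_list dictionary frecuency
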